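-- pv_equiv track=rewrite | github.com/repeale/fp-go | generators/generators.py | curry_func
-- ===== SOURCE A (Python) =====
-- def curry_func(n: int) -> str:
--     gen = ", ".join(f"T{i+1}" for i in range(n))
--     ret = " ".join(f"func(T{i+1})" for i in range(n)) + " R"
--
--     line = lambda x: x * "\t" + f"return func(t{x} T{x}) " + " ".join(f"func(T{i+1})" for i in range(x, n)) + " R {"
--
--     all_returns = "\n".join(line(i+1) for i in range(n))
--
--     function = (n+1) * "\t" + "return fn(" + ", ".join(f"t{i+1}" for i in range(n)) + ")"
--
--     all_closes = "\n".join(i * "\t" + "}" for i in range(n, 0, -1))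
--
--     return f"""// Allow to transform a function that receives {n} params in a sequence of unary functions
-- func Curry{n}[{gen}, R any](fn func({gen}) R) {ret} {{
-- {all_returns}
-- {function}
-- {all_closes}
-- }}
-- """
-- ===== SOURCE B (Python) =====
-- def curry_func(n: int) -> str:
--     # Precompute the type fragments once, then build the nested return lines
--     # and the closing braces in ONE descending loop that maintains a running
--     # suffix string instead of re-joining range(x, n) for every line.
--     types = [f"T{i}" for i in range(1, n + 1)]
--     funcs = [f"func({t})" for t in types]
--
--     rets = []
--     closes = []
--     suffix = ""
--     for x in range(n, 0, -1):
--         rets.append("\t" * x + f"return func(t{x} T{x}) " + suffix + " R {")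
--         closes.append("\t" * x + "}")
--         suffix = funcs[x - 1] if x == n else funcs[x - 1] + " " + suffix
--     rets.reverse()
--
--     gen = ", ".join(types)
--     lines = [
--         f"// Allow to transform a function that receives {n} params in a sequence of unary functions",
--         f"func Curry{n}[{gen}, R any](fn func({gen}) R) " + suffix + " R {",
--         "\n".join(rets),
--         "\t" * (n + 1) + "return fn(" + ", ".join(f"t{i}" for i in range(1, n + 1)) + ")",
--         "\n".join(closes),
--         "}",
--     ]
--     return "\n".join(lines) + "\n"
-- ===== Notes on version B (the rewrite author's own statement) =====
-- stated objective: alternative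
-- what changed: A re-joins the func(T_i) fragments over range(x, n) for every nesting level (quadratic re-joining) and formats via an f-string template; B precomputes the fragments once, builds the return lines, closing braces and the signature's return-type suffix in a single descending loop that maintains a running suffix string, and joins a list of lines at the end.
import Mathlib
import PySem

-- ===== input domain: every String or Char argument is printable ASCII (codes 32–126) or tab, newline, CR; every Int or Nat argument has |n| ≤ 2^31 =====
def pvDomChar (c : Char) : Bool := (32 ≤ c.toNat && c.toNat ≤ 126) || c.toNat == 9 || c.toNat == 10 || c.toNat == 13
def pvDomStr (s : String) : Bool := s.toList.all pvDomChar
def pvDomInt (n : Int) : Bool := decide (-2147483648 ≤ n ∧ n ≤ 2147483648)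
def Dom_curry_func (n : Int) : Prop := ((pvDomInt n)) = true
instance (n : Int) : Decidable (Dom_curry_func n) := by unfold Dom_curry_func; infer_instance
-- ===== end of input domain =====

-- B builds the nested return lines, closing braces and the signature's return-type suffix in one
-- descending loop maintaining a running suffix string, instead of A's per-level re-join over
-- range(x, n); objective: alternative decomposition (same output, not claimed faster).

-- x * "\t" (Python string repetition; empty for x ≤ 0, exact)
def pyTabs (x : Int) : String := String.ofList (List.replicate x.toNat '\t')

-- ===== PORT A =====
def curry_func (n : Int) : String :=
  let gen := PySem.Str.join ", " ((PySem.List.pyRange 0 n 1).map (fun i => "T" ++ PySem.Int.toStr (i+1)))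
  let ret := PySem.Str.join " " ((PySem.List.pyRange 0 n 1).map (fun i => "func(T" ++ PySem.Int.toStr (i+1) ++ ")")) ++ " R"
  let line := fun (x : Int) =>
    pyTabs x ++ "return func(t" ++ PySem.Int.toStr x ++ " T" ++ PySem.Int.toStr x ++ ") " ++
      PySem.Str.join " " ((PySem.List.pyRange x n 1).map (fun i => "func(T" ++ PySem.Int.toStr (i+1) ++ ")")) ++ " R {"
  let all_returns := PySem.Str.join "\n" ((PySem.List.pyRange 0 n 1).map (fun i => line (i+1)))
  let function := pyTabs (n+1) ++ "return fn(" ++ PySem.Str.join ", " ((PySem.List.pyRange 0 n 1).map (fun i => "t" ++ PySem.Int.toStr (i+1))) ++ ")"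
  let all_closes := PySem.Str.join "\n" ((PySem.List.pyRange n 0 (-1)).map (fun i => pyTabs i ++ "}"))
  "// Allow to transform a function that receives " ++ PySem.Int.toStr n ++
    " params in a sequence of unary functions\nfunc Curry" ++ PySem.Int.toStr n ++ "[" ++ gen ++
    ", R any](fn func(" ++ gen ++ ") R) " ++ ret ++ " {\n" ++ all_returns ++ "\n" ++ function ++
    "\n" ++ all_closes ++ "\n}\n"

-- ===== PORT B =====
-- the body of B's single descending loop (rets, closes, running suffix)
def curryAltStep (n : Int) (funcs : List String) (st : List String × List String × String) (x : Int) :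
    List String × List String × String :=
  (st.1 ++ [pyTabs x ++ "return func(t" ++ PySem.Int.toStr x ++ " T" ++ PySem.Int.toStr x ++ ") " ++ st.2.2 ++ " R {"],
   st.2.1 ++ [pyTabs x ++ "}"],
   if x == n then PySem.List.pyGetD funcs (x-1) ""
   else PySem.List.pyGetD funcs (x-1) "" ++ " " ++ st.2.2)

def curry_func_alt (n : Int) : String :=
  let types := (PySem.List.pyRange 1 (n+1) 1).map (fun i => "T" ++ PySem.Int.toStr i)
  let funcs := types.map (fun t => "func(" ++ t ++ ")")
  let st := (PySem.List.pyRange n 0 (-1)).foldl (curryAltStep n funcs) ([], [], "")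
  let rets := st.1.reverse
  let gen := PySem.Str.join ", " types
  let lines := [
    "// Allow to transform a function that receives " ++ PySem.Int.toStr n ++ " params in a sequence of unary functions",
    "func Curry" ++ PySem.Int.toStr n ++ "[" ++ gen ++ ", R any](fn func(" ++ gen ++ ") R) " ++ st.2.2 ++ " R {",
    PySem.Str.join "\n" rets,
    pyTabs (n+1) ++ "return fn(" ++ PySem.Str.join ", " ((PySem.List.pyRange 1 (n+1) 1).map (fun i => "t" ++ PySem.Int.toStr i)) ++ ")",
    PySem.Str.join "\n" st.2.1,
    "}"]
  PySem.Str.join "\n" lines ++ "\n"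

-- ===== PRECONDITION & SPEC =====
def Spec_curry_func (n : Int) (out : String) : Prop := out = curry_func_alt n
instance (n : Int) (out : String) : Decidable (Spec_curry_func n out) := by unfold Spec_curry_func; infer_instance

-- ===== CLAIM (what is proved, stated in full; the proofs are below) =====
def Claim_equal_curry_func : Prop := ∀ (n : Int), Dom_curry_func n → Spec_curry_func n (curry_func n)

-- ===== LEMMAS AND PROOFS =====

theorem sjoin_nil (sep : String) : PySem.Str.join sep [] = "" := by
  apply String.ext; simp [PySem.Str.toList_join, PySem.Chars.join_nil]

theorem sjoin_singleton (sep a : String) : PySem.Str.join sep [a] = a := by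
  apply String.ext; simp [PySem.Str.toList_join, PySem.Chars.join_singleton]

theorem sjoin_cons_cons (sep a b : String) (l : List String) :
    PySem.Str.join sep (a :: b :: l) = a ++ sep ++ PySem.Str.join sep (b :: l) := by
  apply String.ext; simp [PySem.Str.toList_join, PySem.Chars.join_cons_cons]

-- the two shifted index ranges produce the same fragment lists
theorem map_shift (f : Int → String) (n : Int) :
    (PySem.List.pyRange 0 n 1).map (fun i => f (i+1)) = (PySem.List.pyRange 1 (n+1) 1).map f := by
  simp only [PySem.List.pyRange_one, List.map_map]
  rw [show (n + 1 - 1) = n from by ring, show (n - 0) = n from by ring]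
  apply List.map_congr_left
  intro k _
  simp only [Function.comp_apply]
  exact congrArg f (by ring)

theorem types_shift (n : Int) (pre : String) :
    (PySem.List.pyRange 1 (n+1) 1).map (fun i => pre ++ PySem.Int.toStr i)
      = (PySem.List.pyRange 0 n 1).map (fun i => pre ++ PySem.Int.toStr (i+1)) :=
  (map_shift (fun i => pre ++ PySem.Int.toStr i) n).symm

theorem funcs_eq (n : Int) :
    ((PySem.List.pyRange 1 (n+1) 1).map (fun i => "T" ++ PySem.Int.toStr i)).map (fun t => "func(" ++ t ++ ")")
      = (PySem.List.pyRange 0 n 1).map (fun i => "func(T" ++ PySem.Int.toStr (i+1) ++ ")") := by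
  rw [types_shift]
  rw [List.map_map]
  apply List.map_congr_left
  intro k _
  simp only [Function.comp_apply]
  rw [show ("func(" : String) ++ ("T" ++ PySem.Int.toStr (k+1)) = ("func(" ++ "T") ++ PySem.Int.toStr (k+1) from (String.append_assoc).symm]
  rfl

theorem drop_funcs_eq (n : Int) {x : Int} (h0 : 0 ≤ x) (hx : x ≤ n) :
    ((PySem.List.pyRange 0 n 1).map (fun i => "func(T" ++ PySem.Int.toStr (i+1) ++ ")")).drop x.toNat
      = (PySem.List.pyRange x n 1).map (fun i => "func(T" ++ PySem.Int.toStr (i+1) ++ ")") := by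
  rw [PySem.List.pyRange_one_append 0 x n h0 hx, List.map_append]
  apply List.drop_left'
  simp [PySem.List.length_pyRange_one]

-- invariant of B's descending loop: starting at level k with suffix = join of the dropped
-- fragments, it appends the return/close lines for levels k..1 and ends with the full join
theorem loop_inv (n : Int) (funcs : List String) (hlen : funcs.length = n.toNat) :
    ∀ (k : Nat), (k : Int) ≤ n → ∀ (r c : List String),
      (PySem.List.pyRange (k : Int) 0 (-1)).foldl (curryAltStep n funcs)
        (r, c, PySem.Str.join " " (funcs.drop k))
      = (r ++ ((PySem.List.pyRange (k : Int) 0 (-1)).map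
            (fun i => pyTabs i ++ "return func(t" ++ PySem.Int.toStr i ++ " T" ++ PySem.Int.toStr i ++ ") "
                        ++ PySem.Str.join " " (funcs.drop i.toNat) ++ " R {")),
         c ++ ((PySem.List.pyRange (k : Int) 0 (-1)).map (fun i => pyTabs i ++ "}")),
         PySem.Str.join " " funcs) := by
  intro k
  induction k with
  | zero =>
    intro _ r c
    rw [PySem.List.pyRange_neg_one_eq_nil (by norm_num)]
    simp
  | succ k ih =>
    intro hk r c
    have hcons : PySem.List.pyRange ((k+1 : Nat) : Int) 0 (-1)
        = ((k+1 : Nat) : Int) :: PySem.List.pyRange (k : Int) 0 (-1) := by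
      have := PySem.List.pyRange_neg_one_cons (a := ((k+1 : Nat) : Int)) (b := 0) (by positivity)
      rw [this]
      norm_num
    have hklt : k < funcs.length := by
      rw [hlen]; omega
    have hdropk : funcs.drop k = funcs[k] :: funcs.drop (k+1) := List.drop_eq_getElem_cons hklt
    have hget : PySem.List.pyGetD funcs (((k+1 : Nat) : Int) - 1) "" = funcs[k] := by
      have h1 : (((k+1 : Nat) : Int) - 1) = (k : Int) := by push_cast; ring
      rw [h1, PySem.List.pyGetD_of_nonneg funcs _ (by positivity)]
      simp [List.getD_eq_getElem?_getD, List.getElem?_eq_getElem hklt]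
    have hsuffix : (if ((k+1 : Nat) : Int) == n then PySem.List.pyGetD funcs (((k+1 : Nat) : Int) - 1) ""
        else PySem.List.pyGetD funcs (((k+1 : Nat) : Int) - 1) "" ++ " " ++ PySem.Str.join " " (funcs.drop (k+1)))
        = PySem.Str.join " " (funcs.drop k) := by
      by_cases hn : ((k+1 : Nat) : Int) = n
      · have hdropnil : funcs.drop (k+1) = [] := by
          apply List.drop_eq_nil_of_le
          rw [hlen, ← hn]; simp
        simp only [hn, beq_self_eq_true, if_true, hdropk, hdropnil, sjoin_singleton]
        rw [hn] at hget
        rw [hget]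
      · have hlt : k + 1 < funcs.length := by
          rw [hlen]; omega
        obtain ⟨b, l', hbl⟩ : ∃ b l', funcs.drop (k+1) = b :: l' := by
          have : funcs.drop (k+1) ≠ [] := by
            apply List.ne_nil_of_length_pos
            simp; omega
          cases h : funcs.drop (k+1) with
          | nil => exact absurd h this
          | cons b l' => exact ⟨b, l', rfl⟩
        simp only [beq_iff_eq, hn, if_false, hget, hdropk, hbl, sjoin_cons_cons]
    rw [hcons]
    simp only [List.foldl_cons]
    have hstep : curryAltStep n funcs (r, c, PySem.Str.join " " (funcs.drop (k+1))) ((k+1 : Nat) : Int)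
        = (r ++ [pyTabs ((k+1 : Nat) : Int) ++ "return func(t" ++ PySem.Int.toStr ((k+1 : Nat) : Int)
                  ++ " T" ++ PySem.Int.toStr ((k+1 : Nat) : Int) ++ ") "
                  ++ PySem.Str.join " " (funcs.drop (k+1)) ++ " R {"],
           c ++ [pyTabs ((k+1 : Nat) : Int) ++ "}"],
           PySem.Str.join " " (funcs.drop k)) := by
      rw [curryAltStep]
      simp only [← hsuffix]
    rw [hstep, ih (by omega)]
    simp [List.append_assoc]

-- byte-for-byte equality of the two assemblies, over arbitrary fragment strings
theorem assemble (s g r ar fn cl : String) :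
    "// Allow to transform a function that receives " ++ s ++
      " params in a sequence of unary functions\nfunc Curry" ++ s ++ "[" ++ g ++
      ", R any](fn func(" ++ g ++ ") R) " ++ (r ++ " R") ++ " {\n" ++ ar ++ "\n" ++ fn ++
      "\n" ++ cl ++ "\n}\n"
    = PySem.Str.join "\n"
        ["// Allow to transform a function that receives " ++ s ++ " params in a sequence of unary functions",
         "func Curry" ++ s ++ "[" ++ g ++ ", R any](fn func(" ++ g ++ ") R) " ++ r ++ " R {",
         ar, fn, cl, "}"] ++ "\n" := by
  rw [sjoin_cons_cons, sjoin_cons_cons, sjoin_cons_cons, sjoin_cons_cons, sjoin_cons_cons, sjoin_singleton]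
  rw [show (" params in a sequence of unary functions\nfunc Curry" : String)
        = " params in a sequence of unary functions" ++ "\n" ++ "func Curry" from rfl]
  rw [show (" {\n" : String) = " {" ++ "\n" from rfl]
  rw [show ("\n}\n" : String) = "\n" ++ "}" ++ "\n" from rfl]
  rw [show (" R {" : String) = " R" ++ " {" from rfl]
  simp only [String.append_assoc]

-- ===== VERDICT (by name: the statement is the Claim_ definition above) =====
theorem curry_func_spec : Claim_equal_curry_func := by
  intro n _
  simp only [Spec_curry_func, curry_func, curry_func_alt]
  rw [funcs_eq, types_shift, types_shift]
  rcases le_or_gt 0 n with hn | hn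
  · -- n ≥ 0 : apply the loop invariant at the top level
    have hlen : ((PySem.List.pyRange 0 n 1).map (fun i => "func(T" ++ PySem.Int.toStr (i+1) ++ ")")).length = n.toNat := by
      simp [PySem.List.length_pyRange_one]
    have hstart : ("" : String) = PySem.Str.join " "
        (((PySem.List.pyRange 0 n 1).map (fun i => "func(T" ++ PySem.Int.toStr (i+1) ++ ")")).drop n.toNat) := by
      rw [List.drop_eq_nil_of_le (by rw [hlen])]
      rw [sjoin_nil]
    have hne : ((n.toNat : Nat) : Int) = n := Int.toNat_of_nonneg hn
    have hinv := loop_inv n _ hlen n.toNat (by rw [hne]) [] []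
    rw [hne] at hinv
    rw [hstart, hinv]
    simp only [List.nil_append]
    simp only [PySem.List.pyRange_neg_one_eq_reverse, zero_add, List.map_reverse, List.reverse_reverse]
    have hA := (map_shift (fun x => pyTabs x ++ "return func(t" ++ PySem.Int.toStr x ++ " T" ++ PySem.Int.toStr x ++ ") "
        ++ PySem.Str.join " " ((PySem.List.pyRange x n 1).map (fun i => "func(T" ++ PySem.Int.toStr (i+1) ++ ")")) ++ " R {") n)
    rw [hA]
    have hrets : (PySem.List.pyRange 1 (n+1) 1).map
          (fun i => pyTabs i ++ "return func(t" ++ PySem.Int.toStr i ++ " T" ++ PySem.Int.toStr i ++ ") "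
            ++ PySem.Str.join " " (((PySem.List.pyRange 0 n 1).map (fun j => "func(T" ++ PySem.Int.toStr (j+1) ++ ")")).drop i.toNat) ++ " R {")
        = (PySem.List.pyRange 1 (n+1) 1).map
          (fun x => pyTabs x ++ "return func(t" ++ PySem.Int.toStr x ++ " T" ++ PySem.Int.toStr x ++ ") "
            ++ PySem.Str.join " " ((PySem.List.pyRange x n 1).map (fun i => "func(T" ++ PySem.Int.toStr (i+1) ++ ")")) ++ " R {") := by
      apply List.map_congr_left
      intro i hi
      rw [PySem.List.mem_pyRange_one] at hi
      rw [drop_funcs_eq n (by omega) (by omega)]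
    rw [hrets]
    exact assemble _ _ _ _ _ _
  · -- n < 0 : every range is empty
    rw [PySem.List.pyRange_one_eq_nil (by omega), PySem.List.pyRange_neg_one_eq_nil (by omega)]
    simp only [List.map_nil, List.foldl_nil, List.reverse_nil, sjoin_nil]
    exact assemble _ _ _ _ _ _
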